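-- pv_equiv track=rewrite | github.com/devswordfish/estudos-lp3 | 02-funcoes/exercicios/ex4.py | separate_list
-- ===== SOURCE A (Python) =====
-- def separate_list(lis: list[str]):
--     new_text = ''
--     length = len(lis)
--
--     for i, value in enumerate(lis):
--         new_text += value
--
--         if i < length - 1:
--             new_text += ', ' if i < length - 2 else ' e '
--
--     return new_text
-- ===== SOURCE B (Python) =====
-- def separate_list(lis: list[str]):
--     if not lis:
--         return ''
--     *init, last = lis
--     if not init:
--         return last
--     return ', '.join(init) + ' e ' + last
-- ===== Notes on version B (the rewrite author's own statement) =====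
-- stated objective: simpler
-- what changed: Replaces the index-counting loop with a per-element conditional separator by unpacking the list into prefix and last element and comma-joining the prefix once, then appending ' e ' and the last element.
import Mathlib
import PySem

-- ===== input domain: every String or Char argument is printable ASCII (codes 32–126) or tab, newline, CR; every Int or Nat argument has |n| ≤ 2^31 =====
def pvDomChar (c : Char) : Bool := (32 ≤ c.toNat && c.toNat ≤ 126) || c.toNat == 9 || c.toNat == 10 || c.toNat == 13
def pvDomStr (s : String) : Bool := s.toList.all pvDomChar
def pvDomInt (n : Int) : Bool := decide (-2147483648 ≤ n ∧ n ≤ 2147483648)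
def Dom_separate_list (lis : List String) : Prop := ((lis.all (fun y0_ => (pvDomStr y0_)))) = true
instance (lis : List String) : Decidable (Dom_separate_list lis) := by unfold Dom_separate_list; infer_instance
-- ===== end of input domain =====

-- B replaces the index-counting loop (separator chosen per index) with one comma-join of the
-- prefix plus a final ' e ' and the last element — objective: simpler.

-- ===== PORT A =====
-- loop body of A's for-loop: new_text += value; conditional separator append
def stepA (length : Int) (new_text : String) (iv : Int × String) : String :=
  let new_text := new_text ++ iv.2
  if iv.1 < length - 1 then
    new_text ++ (if iv.1 < length - 2 then ", " else " e ")
  else new_text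

def separate_list (lis : List String) : String :=
  let length : Int := lis.length
  (PySem.List.enumerate lis 0).foldl (stepA length) ""

-- ===== PORT B =====
def separate_list_alt (lis : List String) : String :=
  match lis with
  | [] => ""
  | x :: xs =>
    let init := (x :: xs).dropLast          -- *init, last = lis
    let last := (x :: xs).getLast (by simp)
    if init = [] then last
    else PySem.Str.join ", " init ++ " e " ++ last

-- ===== PRECONDITION & SPEC =====
def Spec_separate_list (lis : List String) (out : String) : Prop := out = separate_list_alt lis
instance (lis : List String) (out : String) : Decidable (Spec_separate_list lis out) := by unfold Spec_separate_list; infer_instance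

-- ===== CLAIM (what is proved, stated in full; the proofs are below) =====
def Claim_equal_separate_list : Prop := ∀ (lis : List String), Dom_separate_list lis → Spec_separate_list lis (separate_list lis)

-- ===== LEMMAS AND PROOFS =====

-- common characterisation of the output, as a list of chars
def gSep : List String → List Char
  | [] => []
  | [x] => x.toList
  | [x, y] => x.toList ++ (" e ").toList ++ y.toList
  | x :: y :: z :: rest => x.toList ++ (", ").toList ++ gSep (y :: z :: rest)

theorem foldA_eq (n : Int) (l : List String) : ∀ (s : Int) (acc : String),
    s + l.length = n →
    ((PySem.List.enumerate l s).foldl (stepA n) acc).toList = acc.toList ++ gSep l := by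
  induction l with
  | nil => intro s acc h; simp [PySem.List.enumerate, gSep]
  | cons x rest ih =>
    intro s acc h
    rw [PySem.List.enumerate_cons, List.foldl_cons]
    cases rest with
    | nil =>
      have hs : ¬ (s < n - 1) := by simp at h; omega
      simp [PySem.List.enumerate, stepA, hs, gSep]
    | cons y ys =>
      have h' : (s + 1) + ((y :: ys).length : Int) = n := by
        simp only [List.length_cons] at h ⊢; push_cast at h ⊢; omega
      have hs : s < n - 1 := by simp at h; omega
      rw [ih (s + 1) _ h']
      cases ys with
      | nil =>
        have hs2 : ¬ (s < n - 2) := by simp at h; omega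
        simp [stepA, hs, hs2, gSep]
      | cons z zs =>
        have hs2 : s < n - 2 := by simp at h; omega
        simp [stepA, hs, hs2, gSep]

theorem altB_eq : ∀ (x : String) (xs : List String),
    (separate_list_alt (x :: xs)).toList = gSep (x :: xs) := by
  intro x xs
  induction xs generalizing x with
  | nil => simp [separate_list_alt, gSep]
  | cons y ys ih =>
    cases ys with
    | nil => simp [separate_list_alt, gSep, PySem.Str.toList_join, PySem.Chars.join_singleton]
    | cons z zs =>
      have hy := ih y
      simp only [separate_list_alt] at hy ⊢
      have hne : (y :: z :: zs).dropLast ≠ [] := by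
        cases zs <;> simp [List.dropLast]
      rw [show (x :: y :: z :: zs).dropLast = x :: (y :: z :: zs).dropLast from rfl]
      simp only [List.cons_ne_nil, reduceIte]
      rw [if_neg hne] at hy
      have hlast : (x :: y :: z :: zs).getLast (by simp) = (y :: z :: zs).getLast (by simp) := by
        simp [List.getLast_cons]
      rw [hlast]
      -- join ", " (x :: d) with d ≠ []
      obtain ⟨d0, d', hd'⟩ : ∃ d0 d', (y :: z :: zs).dropLast = d0 :: d' := by
        cases h' : (y :: z :: zs).dropLast with
        | nil => exact absurd h' hne
        | cons a b => exact ⟨a, b, rfl⟩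
      rw [hd']
      rw [hd'] at hy
      simp only [String.toList_append, PySem.Str.toList_join, List.map_cons,
        PySem.Chars.join_cons_cons] at hy ⊢
      rw [gSep]
      rw [← hy]
      simp

theorem separate_list_eq_gSep (lis : List String) :
    (separate_list lis).toList = gSep lis := by
  have := foldA_eq (lis.length : Int) lis 0 "" (by simp)
  simpa [separate_list] using this

-- ===== VERDICT (by name: the statement is the Claim_ definition above) =====
theorem separate_list_spec : Claim_equal_separate_list := by
  intro lis _
  unfold Spec_separate_list
  apply String.toList_inj.mp
  rw [separate_list_eq_gSep]
  cases lis with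
  | nil => simp [separate_list_alt, gSep]
  | cons x xs => exact (altB_eq x xs).symm
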